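-- pv_equiv track=rewrite | github.com/django/django | venv/lib/python3.11/site-packages/setuptools/_vendor/packaging/metadata.py | _parse_project_urls
-- ===== SOURCE A (Python) =====
-- from typing import Dict, List, Optional, Tuple, Union, cast
--
-- def _parse_project_urls(data: List[str]) -> Dict[str, str]:
--     """Parse a list of label/URL string pairings separated by a comma."""
--     urls = {}
--     for pair in data:
--         # Our logic is slightly tricky here as we want to try and do
--         # *something* reasonable with malformed data.
--         #
--         # The main thing that we have to worry about, is data that does
--         # not have a ',' at all to split the label from the Value. There
--         # isn't a singular right answer here, and we will fail validation
--         # later on (if the caller is validating) so it doesn't *really*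
--         # matter, but since the missing value has to be an empty str
--         # and our return value is dict[str, str], if we let the key
--         # be the missing value, then they'd have multiple '' values that
--         # overwrite each other in a accumulating dict.
--         #
--         # The other potentional issue is that it's possible to have the
--         # same label multiple times in the metadata, with no solid "right"
--         # answer with what to do in that case. As such, we'll do the only
--         # thing we can, which is treat the field as unparseable and add it
--         # to our list of unparsed fields.
--         parts = [p.strip() for p in pair.split(",", 1)]
--         parts.extend([""] * (max(0, 2 - len(parts))))  # Ensure 2 items
--
--         # TODO: The spec doesn't say anything about if the keys should be
--         #       considered case sensitive or not... logically they should
--         #       be case-preserving and case-insensitive, but doing that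
--         #       would open up more cases where we might have duplicate
--         #       entries.
--         label, url = parts
--         if label in urls:
--             # The label already exists in our set of urls, so this field
--             # is unparseable, and we can just add the whole thing to our
--             # unparseable data and stop processing it.
--             raise KeyError("duplicate labels in project urls")
--         urls[label] = url
--
--     return urls
-- ===== SOURCE B (Python) =====
-- def _parse_project_urls(data):
--     """Parse a list of label/URL string pairings separated by a comma."""
--     pairs = []
--     for pair in data:
--         parts = [p.strip() for p in pair.split(",", 1)]
--         parts += [""] * (2 - len(parts))
--         pairs.append((parts[0], parts[1]))
--     labels = [label for label, _ in pairs]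
--     if len(labels) != len(set(labels)):
--         raise KeyError("duplicate labels in project urls")
--     return dict(pairs)
-- ===== Notes on version B (the rewrite author's own statement) =====
-- stated objective: alternative
-- what changed: A builds the dict in one inline loop with a membership check before each insert; B first parses all strings into (label, url) pairs, then detects duplicates globally by comparing len(labels) with len(set(labels)), and finally builds the dict from the pair list.
import Mathlib
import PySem

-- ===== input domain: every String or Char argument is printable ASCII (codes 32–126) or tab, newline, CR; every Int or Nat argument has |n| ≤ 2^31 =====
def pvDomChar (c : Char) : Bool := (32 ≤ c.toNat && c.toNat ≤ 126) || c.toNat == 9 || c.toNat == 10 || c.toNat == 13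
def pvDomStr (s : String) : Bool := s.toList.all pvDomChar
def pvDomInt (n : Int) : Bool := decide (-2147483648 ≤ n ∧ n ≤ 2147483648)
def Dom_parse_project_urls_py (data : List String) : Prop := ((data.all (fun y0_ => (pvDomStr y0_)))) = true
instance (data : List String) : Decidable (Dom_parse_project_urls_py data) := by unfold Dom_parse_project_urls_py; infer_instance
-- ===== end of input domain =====

-- B replaces A's inline build-and-check loop by a parse pass, a global duplicate check comparing list and set sizes, then dict(pairs); same cost, different decomposition.

-- ===== PORT A =====
-- A's per-pair parsing: split on the first comma, strip each part, pad to two items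
def partsA (pair : String) : List String :=
  let parts := ((PySem.Str.splitMax? pair "," 1).getD []).map PySem.Str.strip
  parts ++ List.replicate (max 0 (2 - parts.length)) ""

-- A's loop: dict accumulator with a membership check before each insert; `none` = the KeyError raise
def parseA_loop : List String → PySem.Dict String String → Option (PySem.Dict String String)
  | [], urls => some urls
  | pair :: rest, urls =>
      let parts := partsA pair
      let label := parts.headD ""
      let url := parts.getD 1 ""
      if urls.contains label then none
      else parseA_loop rest (urls.insert label url)

def parse_project_urls_py (data : List String) : List (String × String) :=
  ((parseA_loop data PySem.Dict.empty).map PySem.Dict.items).getD []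

-- ===== PORT B =====
-- B's parse pass body: yields the (label, url) pair of one string
def pvParsePair (pair : String) : String × String :=
  let parts := ((PySem.Str.splitMax? pair "," 1).getD []).map PySem.Str.strip
  let parts := parts ++ List.replicate (2 - parts.length) ""
  (parts.headD "", parts.getD 1 "")

def parse_project_urls_py_alt (data : List String) : List (String × String) :=
  let pairs := data.map pvParsePair
  let labels := pairs.map Prod.fst
  if labels.length ≠ (PySem.Set.ofList labels).length then []  -- the KeyError raise; outside Pre_
  else (pairs.foldl (fun d p => d.insert p.1 p.2) PySem.Dict.empty).items

-- ===== PRECONDITION & SPEC =====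
-- Pre_ excludes exactly the inputs whose parsed labels repeat: on those A raises KeyError (B raises the same KeyError).
def pvLabel (s : String) : String :=
  PySem.Str.strip (((PySem.Str.splitMax? s "," 1).getD []).headD "")

def Pre_parse_project_urls_py (data : List String) : Prop := (data.map pvLabel).Nodup
instance (data : List String) : Decidable (Pre_parse_project_urls_py data) := by
  unfold Pre_parse_project_urls_py; infer_instance

def pvWitness_parse_project_urls_py : List String :=
  ["homepage, https://example.com", "docs,https://d.example", "bare"]

def Spec_parse_project_urls_py (data : List String) (out : List (String × String)) : Prop := out = parse_project_urls_py_alt data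
instance (data : List String) (out : List (String × String)) : Decidable (Spec_parse_project_urls_py data out) := by unfold Spec_parse_project_urls_py; infer_instance

-- ===== CLAIM (what is proved, stated in full; the proofs are below) =====
def Claim_equal_parse_project_urls_py : Prop := ∀ (data : List String), Dom_parse_project_urls_py data → Pre_parse_project_urls_py data → Spec_parse_project_urls_py data (parse_project_urls_py data)

-- ===== LEMMAS AND PROOFS =====

-- B's pair is built from the same padded parts list as A's
theorem pvParsePair_eq (pair : String) :
    pvParsePair pair = ((partsA pair).headD "", (partsA pair).getD 1 "") := by
  simp [pvParsePair, partsA]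

-- the head of the padded parts list is the label Pre_ talks about
theorem partsA_headD (pair : String) : (partsA pair).headD "" = pvLabel pair := by
  unfold partsA pvLabel
  cases h : (PySem.Str.splitMax? pair "," 1).getD [] with
  | nil => simp [PySem.Str.strip]; decide
  | cons a l => simp

theorem pvParsePair_fst (s : String) : (pvParsePair s).1 = pvLabel s := by
  rw [pvParsePair_eq, partsA_headD]

-- A's loop, run from a dict whose keys together with the remaining labels are duplicate-free, appends the parsed pairs
theorem parseA_loop_eq (data : List String) (urls : PySem.Dict String String)
    (h : (urls.keys ++ data.map pvLabel).Nodup) :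
    parseA_loop data urls = some (PySem.Dict.mk (urls.items ++ data.map pvParsePair)) := by
  induction data generalizing urls with
  | nil => simp only [parseA_loop, List.map_nil, List.append_nil]
  | cons pair rest ih =>
      have hnotin : pvLabel pair ∉ urls.keys := by
        intro hmem
        exact (List.nodup_append.mp h).2.2 _ hmem _ (by simp) rfl
      have hc : urls.contains (pvLabel pair) = false := by
        rw [PySem.Dict.contains_eq_decide_mem_keys]; simp [hnotin]
      have hitems : (urls.insert (pvLabel pair) ((partsA pair).getD 1 "")).items
          = urls.items ++ [pvParsePair pair] := by
        rw [PySem.Dict.items_insert_of_not_contains _ _ hc, pvParsePair_eq, ← partsA_headD]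
      have hkeys : (urls.insert (pvLabel pair) ((partsA pair).getD 1 "")).keys
          = urls.keys ++ [pvLabel pair] := by
        simp only [PySem.Dict.keys, hitems, List.map_append]
        simp [pvParsePair_fst]
      rw [show parseA_loop (pair :: rest) urls =
            (if urls.contains ((partsA pair).headD "") then none
             else parseA_loop rest (urls.insert ((partsA pair).headD "") ((partsA pair).getD 1 ""))) from rfl,
          partsA_headD, hc]
      simp only [Bool.false_eq_true, if_false]
      rw [ih _ (by rw [hkeys]; simpa using h), hitems]
      simp

-- ===== VERDICT (by name: the statement is the Claim_ definition above) =====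
theorem parse_project_urls_py_spec : Claim_equal_parse_project_urls_py := by
  intro data _ hpre
  unfold Spec_parse_project_urls_py parse_project_urls_py parse_project_urls_py_alt
  have hlabels : (data.map pvParsePair).map Prod.fst = data.map pvLabel := by
    simp [pvParsePair_fst]
  have hnodup : ((data.map pvParsePair).map Prod.fst).Nodup := by rw [hlabels]; exact hpre
  rw [parseA_loop_eq data PySem.Dict.empty (by simpa using hpre)]
  have hset : PySem.Set.ofList ((data.map pvParsePair).map Prod.fst)
      = (data.map pvParsePair).map Prod.fst := by
    exact PySem.Set.ofList_eq_self_of_nodup _ hnodup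
  simp only [hset, ne_eq, not_true_eq_false, if_false]
  rw [PySem.Dict.items_foldl_insert_fresh (data.map pvParsePair) Prod.fst Prod.snd
      PySem.Dict.empty (by intro a _; rfl) hnodup]
  simp [PySem.Dict.empty]
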